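-- pv_equiv track=rewrite | github.com/weilincheng/LeetCode-practice | string/151_reverse_words_in_a_string.py | trimSides
-- ===== SOURCE A (Python) =====
-- def trimSides(array):
--     if ''.join(array).isspace():
--         return []
--     left, right = 0, len(array) - 1
--     while left < right and array[left].isspace():
--         left += 1
--     while left < right and array[right].isspace():
--         right -= 1
--     return array[left:right + 1]
-- ===== SOURCE B (Python) =====
-- def trimSides(array):
--     if ''.join(array).isspace():
--         return []
--     idx = [i for i, s in enumerate(array) if not s.isspace()]
--     if not idx:
--         return []
--     return array[idx[0]:idx[-1] + 1]
-- ===== Notes on version B (the rewrite author's own statement) =====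
-- stated objective: simpler
-- what changed: Replaces the two directional two-pointer while-loops by one pass that collects all non-whitespace element indices and slices from the first to the last of them.
import Mathlib
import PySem

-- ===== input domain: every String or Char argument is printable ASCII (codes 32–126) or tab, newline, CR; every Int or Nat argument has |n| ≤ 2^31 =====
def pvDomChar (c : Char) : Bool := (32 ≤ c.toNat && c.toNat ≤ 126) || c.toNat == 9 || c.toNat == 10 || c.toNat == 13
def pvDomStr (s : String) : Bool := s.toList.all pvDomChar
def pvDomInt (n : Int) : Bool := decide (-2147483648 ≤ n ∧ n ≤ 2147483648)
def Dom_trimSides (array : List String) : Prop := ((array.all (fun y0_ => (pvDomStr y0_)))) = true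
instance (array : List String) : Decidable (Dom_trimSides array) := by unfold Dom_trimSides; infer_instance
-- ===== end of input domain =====

-- B replaces A's two directional two-pointer scans by one pass collecting the
-- non-whitespace element indices and slicing from the first to the last of them (simpler decomposition).

-- ===== PORT A =====
-- while left < right and array[left].isspace(): left += 1   (array[left] is always in range here)
def trimSidesLeft (array : List String) (left right : Int) : Int :=
  if left < right ∧ PySem.Str.strIsspace (PySem.List.pyGetD array left "") = true then
    trimSidesLeft array (left + 1) right
  else left
termination_by (right - left).toNat
decreasing_by omega

-- while left < right and array[right].isspace(): right -= 1   (array[right] is always in range here)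
def trimSidesRight (array : List String) (left right : Int) : Int :=
  if left < right ∧ PySem.Str.strIsspace (PySem.List.pyGetD array right "") = true then
    trimSidesRight array left (right - 1)
  else right
termination_by (right - left).toNat
decreasing_by omega

def trimSides (array : List String) : List String :=
  if PySem.Str.strIsspace (PySem.Str.join "" array) = true then []
  else
    let left := trimSidesLeft array 0 ((array.length : Int) - 1)
    let right := trimSidesRight array left ((array.length : Int) - 1)
    PySem.List.slice array (some left) (some (right + 1))

-- ===== PORT B =====
-- idx = [i for i, s in enumerate(array) if not s.isspace()]
def nonwsIdx (array : List String) : List Int :=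
  ((PySem.List.enumerate array 0).filter (fun p => ! PySem.Str.strIsspace p.2)).map Prod.fst

def trimSides_alt (array : List String) : List String :=
  if PySem.Str.strIsspace (PySem.Str.join "" array) = true then []
  else
    let idx := nonwsIdx array
    if h : idx = [] then []
    else PySem.List.slice array (some (idx.head h)) (some (PySem.List.pyGetD idx (-1) 0 + 1))

-- ===== PRECONDITION & SPEC =====
def Spec_trimSides (array : List String) (out : List String) : Prop := out = trimSides_alt array
instance (array : List String) (out : List String) : Decidable (Spec_trimSides array out) := by unfold Spec_trimSides; infer_instance

-- ===== CLAIM (what is proved, stated in full; the proofs are below) =====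
def Claim_equal_trimSides : Prop := ∀ (array : List String), Dom_trimSides array → Spec_trimSides array (trimSides array)

-- ===== LEMMAS AND PROOFS =====

lemma mem_nonwsIdx (array : List String) (i : Int) :
    i ∈ nonwsIdx array ↔ ∃ (k : Nat) (h : k < array.length),
      i = (k : Int) ∧ PySem.Str.strIsspace array[k] = false := by
  simp only [nonwsIdx, List.mem_map, List.mem_filter]
  constructor
  · rintro ⟨⟨j, s⟩, ⟨hmem, hws⟩, rfl⟩
    rw [PySem.List.mem_enumerate_iff] at hmem
    obtain ⟨k, hk, heq⟩ := hmem
    simp at heq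
    refine ⟨k, hk, by simpa using heq.1, ?_⟩
    rw [heq.2, PySem.Str.strIsspace_eq] at hws
    simpa using hws
  · rintro ⟨k, hk, rfl, hws⟩
    exact ⟨((k : Int), array[k]),
      ⟨(PySem.List.mem_enumerate_iff _ _ _).mpr ⟨k, hk, by simp⟩,
       by rw [PySem.Str.strIsspace_eq] at hws; simp [hws]⟩, rfl⟩

lemma pairwise_nonwsIdx (array : List String) : (nonwsIdx array).Pairwise (· < ·) :=
  List.pairwise_map.mpr
    (List.Pairwise.sublist List.filter_sublist (PySem.List.pairwise_lt_enumerate array 0))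

lemma le_getLast_of_pairwise {l : List Int} (hp : l.Pairwise (· < ·)) (h : l ≠ []) :
    ∀ x ∈ l, x ≤ l.getLast h := by
  induction l with
  | nil => simp at h
  | cons a t ih =>
    have hpt := List.Pairwise.of_cons hp
    intro x hx
    rcases List.mem_cons.mp hx with rfl | hx
    · cases t with
      | nil => simp
      | cons b u =>
        have hab : x < b := (List.pairwise_cons.mp hp).1 b (by simp)
        have := ih hpt (by simp) b (by simp)
        simpa [List.getLast_cons] using le_of_lt (lt_of_lt_of_le hab this)
    · cases t with
      | nil => simp at hx
      | cons b u =>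
        have := ih hpt (by simp) x (by simpa using hx)
        simpa [List.getLast_cons] using this

lemma head_le_of_pairwise {l : List Int} (hp : l.Pairwise (· < ·)) (h : l ≠ []) :
    ∀ x ∈ l, l.head h ≤ x := by
  cases l with
  | nil => simp at h
  | cons a t =>
    intro x hx
    rcases List.mem_cons.mp hx with rfl | hx
    · simp
    · exact le_of_lt ((List.pairwise_cons.mp hp).1 x hx)

lemma join_empty_sep (L : List (List Char)) : PySem.Chars.join [] L = L.flatten := by
  induction L with
  | nil => simp [PySem.Chars.join, List.intercalate]
  | cons a t ih =>
    cases t with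
    | nil => simp [PySem.Chars.join, List.intercalate]
    | cons b u => simp [PySem.Chars.join_cons_cons, ih]

lemma exists_nonws (array : List String) (hne : array ≠ [])
    (hg : PySem.Str.strIsspace (PySem.Str.join "" array) = false) :
    ∃ (k : Nat) (h : k < array.length), PySem.Str.strIsspace array[k] = false := by
  rw [PySem.Str.strIsspace_eq, PySem.Str.toList_join] at hg
  have hsep : ("" : String).toList = [] := rfl
  rw [hsep, join_empty_sep] at hg
  simp only [PySem.Chars.strIsspace, Bool.and_eq_false_iff, Bool.not_eq_false',
    List.isEmpty_iff, List.all_eq_false] at hg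
  rcases hg with hflat | ⟨c, hc, hcws⟩
  · have h0 : 0 < array.length := List.length_pos_iff.mpr hne
    refine ⟨0, h0, ?_⟩
    have : array[0].toList = [] := by
      have := List.flatten_eq_nil_iff.mp hflat
      exact this _ (List.mem_map_of_mem (l := array) (f := String.toList) (List.getElem_mem h0))
    rw [PySem.Str.strIsspace_eq, this]
    rfl
  · obtain ⟨t, ht, hct⟩ := List.mem_flatten.mp hc
    obtain ⟨s, hs, rfl⟩ := List.mem_map.mp ht
    obtain ⟨k, hk, hks⟩ := List.mem_iff_getElem.mp hs
    refine ⟨k, hk, ?_⟩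
    rw [PySem.Str.strIsspace_eq, hks]
    simp only [PySem.Chars.strIsspace, Bool.and_eq_false_iff]
    right
    exact List.all_eq_false.mpr ⟨c, hct, by simp [hcws]⟩

lemma nonwsIdx_ne_nil (array : List String) (hne : array ≠ [])
    (hg : PySem.Str.strIsspace (PySem.Str.join "" array) = false) : nonwsIdx array ≠ [] := by
  obtain ⟨k, hk, hws⟩ := exists_nonws array hne hg
  exact List.ne_nil_of_mem ((mem_nonwsIdx array k).mpr ⟨k, hk, rfl, hws⟩)

lemma trimLeft_eq (array : List String) (f : Int)
    (hfn : f ≤ (array.length : Int) - 1)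
    (hf : PySem.Str.strIsspace (PySem.List.pyGetD array f "") = false)
    (hbelow : ∀ j : Int, 0 ≤ j → j < f → PySem.Str.strIsspace (PySem.List.pyGetD array j "") = true) :
    ∀ (d : Nat) (left : Int), 0 ≤ left → left ≤ f → (f - left).toNat ≤ d →
      trimSidesLeft array left ((array.length : Int) - 1) = f := by
  intro d
  induction d with
  | zero =>
    intro left h0 hlf hd
    have : left = f := by omega
    subst this
    rw [trimSidesLeft]
    simp only [hf, Bool.false_eq_true, and_false, if_false]
  | succ d ih =>
    intro left h0 hlf hd
    by_cases hlt : left < f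
    · rw [trimSidesLeft]
      have hc : left < (array.length : Int) - 1 ∧
          PySem.Str.strIsspace (PySem.List.pyGetD array left "") = true :=
        ⟨by omega, hbelow left h0 hlt⟩
      rw [if_pos hc]
      exact ih (left + 1) (by omega) (by omega) (by omega)
    · have : left = f := by omega
      subst this
      rw [trimSidesLeft]
      simp only [hf, Bool.false_eq_true, and_false, if_false]

lemma trimRight_eq (array : List String) (f l : Int) (hfl : f ≤ l)
    (hl : PySem.Str.strIsspace (PySem.List.pyGetD array l "") = false)
    (habove : ∀ j : Int, l < j → j ≤ (array.length : Int) - 1 →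
      PySem.Str.strIsspace (PySem.List.pyGetD array j "") = true) :
    ∀ (d : Nat) (right : Int), l ≤ right → right ≤ (array.length : Int) - 1 → (right - l).toNat ≤ d →
      trimSidesRight array f right = l := by
  intro d
  induction d with
  | zero =>
    intro right hlr hrn hd
    have : right = l := by omega
    subst this
    rw [trimSidesRight]
    simp only [hl, Bool.false_eq_true, and_false, if_false]
  | succ d ih =>
    intro right hlr hrn hd
    by_cases hlt : l < right
    · rw [trimSidesRight]
      have hc : f < right ∧
          PySem.Str.strIsspace (PySem.List.pyGetD array right "") = true :=
        ⟨by omega, habove right hlt hrn⟩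
      rw [if_pos hc]
      exact ih (right - 1) (by omega) (by omega) (by omega)
    · have : right = l := by omega
      subst this
      rw [trimSidesRight]
      simp only [hl, Bool.false_eq_true, and_false, if_false]

-- ===== VERDICT (by name: the statement is the Claim_ definition above) =====
theorem trimSides_spec : Claim_equal_trimSides := by
  intro array _
  show trimSides array = trimSides_alt array
  by_cases hg : PySem.Str.strIsspace (PySem.Str.join "" array) = true
  · rw [trimSides, trimSides_alt, if_pos hg, if_pos hg]
  · have hgf : PySem.Str.strIsspace (PySem.Str.join "" array) = false :=
      Bool.not_eq_true _ ▸ (by simpa using hg)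
    by_cases hne : array = []
    · subst hne
      rw [trimSides, trimSides_alt, if_neg hg, if_neg hg]
      simp [nonwsIdx, PySem.List.enumerate_nil, PySem.List.slice]
    · have hI : nonwsIdx array ≠ [] := nonwsIdx_ne_nil array hne hgf
      set I := nonwsIdx array with hIdef
      set f := I.head hI with hfdef
      set l := I.getLast hI with hldef
      obtain ⟨kf, hkf, hfk, hfws⟩ := (mem_nonwsIdx array f).mp (List.head_mem hI)
      obtain ⟨kl, hkl, hlk, hlws⟩ := (mem_nonwsIdx array l).mp (List.getLast_mem hI)
      have hmin : ∀ x ∈ I, f ≤ x := head_le_of_pairwise (pairwise_nonwsIdx array) hI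
      have hmax : ∀ x ∈ I, x ≤ l := le_getLast_of_pairwise (pairwise_nonwsIdx array) hI
      have hf0 : (0 : Int) ≤ f := by omega
      have hfn : f ≤ (array.length : Int) - 1 := by omega
      have hln : l ≤ (array.length : Int) - 1 := by omega
      have hfl : f ≤ l := hmax f (List.head_mem hI)
      have hfD : PySem.List.pyGetD array f "" = array[kf] := by
        rw [PySem.List.pyGetD_eq_getElem array "" (by omega) (by omega)]
        congr 1; omega
      have hlD : PySem.List.pyGetD array l "" = array[kl] := by
        rw [PySem.List.pyGetD_eq_getElem array "" (by omega) (by omega)]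
        congr 1; omega
      have hbelow : ∀ j : Int, 0 ≤ j → j < f →
          PySem.Str.strIsspace (PySem.List.pyGetD array j "") = true := by
        intro j hj0 hjf
        by_contra hws
        have hws' : PySem.Str.strIsspace (PySem.List.pyGetD array j "") = false := by
          simpa using hws
        have hjn : j.toNat < array.length := by omega
        have hD : PySem.List.pyGetD array j "" = array[j.toNat] :=
          PySem.List.pyGetD_eq_getElem array "" (by omega) (by omega)
        have : j ∈ I := (mem_nonwsIdx array j).mpr ⟨j.toNat, hjn, by omega, by rw [← hD]; exact hws'⟩
        have := hmin j this
        omega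
      have habove : ∀ j : Int, l < j → j ≤ (array.length : Int) - 1 →
          PySem.Str.strIsspace (PySem.List.pyGetD array j "") = true := by
        intro j hjl hjn'
        by_contra hws
        have hws' : PySem.Str.strIsspace (PySem.List.pyGetD array j "") = false := by
          simpa using hws
        have hjn : j.toNat < array.length := by omega
        have hD : PySem.List.pyGetD array j "" = array[j.toNat] :=
          PySem.List.pyGetD_eq_getElem array "" (by omega) (by omega)
        have : j ∈ I := (mem_nonwsIdx array j).mpr ⟨j.toNat, hjn, by omega, by rw [← hD]; exact hws'⟩
        have := hmax j this
        omega
      have hL : trimSidesLeft array 0 ((array.length : Int) - 1) = f :=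
        trimLeft_eq array f hfn (hfD ▸ hfws) hbelow f.toNat 0 le_rfl hf0 (by omega)
      have hR : trimSidesRight array f ((array.length : Int) - 1) = l :=
        trimRight_eq array f l hfl (hlD ▸ hlws) habove ((array.length : Int) - 1 - l).toNat
          ((array.length : Int) - 1) hln le_rfl (by omega)
      have hLast : PySem.List.pyGetD I (-1) 0 = l := PySem.List.pyGetD_neg_one I 0 hI
      rw [trimSides, trimSides_alt, if_neg hg, if_neg hg]
      simp only [← hIdef]
      rw [dif_neg hI, hL, hR, hLast]
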